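-- pv_equiv track=rewrite | github.com/malus-security/sandblaster | reverse-sandbox/sandbox_regex.py | get_re_index_for_pos
-- ===== SOURCE A (Python) =====
-- def get_re_index_for_pos(regex_list, pos):
--     for idx, item in enumerate(regex_list):
--         if item["pos"] == pos:
--             return idx
--     for idx, item in enumerate(regex_list):
--         if item["pos"]-1 == pos:
--             return idx
--     return -1
-- ===== SOURCE B (Python) =====
-- def get_re_index_for_pos(regex_list, pos):
--     fallback = None
--     for idx, item in enumerate(regex_list):
--         p = item["pos"]
--         if p == pos:
--             return idx
--         if p == pos + 1 and fallback is None: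
--             fallback = idx
--     return -1 if fallback is None else fallback
-- ===== Notes on version B (the rewrite author's own statement) =====
-- stated objective: simpler
-- what changed: A's two sequential scans (first for an exact pos match, then for a pos+1 match) are collapsed into one pass that returns immediately on an exact match and remembers the first pos+1 candidate as a fallback.
import Mathlib
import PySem

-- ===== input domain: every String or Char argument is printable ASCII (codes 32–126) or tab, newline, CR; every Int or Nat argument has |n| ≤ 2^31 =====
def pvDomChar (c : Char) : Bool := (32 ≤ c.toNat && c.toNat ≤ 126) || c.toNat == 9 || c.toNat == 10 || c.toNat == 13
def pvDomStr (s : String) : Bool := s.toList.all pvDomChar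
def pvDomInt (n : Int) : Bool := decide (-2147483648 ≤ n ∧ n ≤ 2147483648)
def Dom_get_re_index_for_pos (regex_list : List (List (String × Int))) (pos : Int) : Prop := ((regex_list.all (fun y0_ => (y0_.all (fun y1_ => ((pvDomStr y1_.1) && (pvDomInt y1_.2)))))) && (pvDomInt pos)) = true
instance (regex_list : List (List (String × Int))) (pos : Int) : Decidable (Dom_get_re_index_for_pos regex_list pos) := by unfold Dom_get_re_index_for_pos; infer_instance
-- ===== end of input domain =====

-- B collapses A's two sequential scans into one pass that returns on an exact pos match
-- and remembers the first pos+1 candidate as a fallback (objective: simpler).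


-- ===== PORT A =====
-- item["pos"] is an association-list first-match lookup; the KeyError case (key absent and
-- reached) is excluded by Pre_, so the default 0 of getD is never observed inside Pre_.
def pvItemPos (item : List (String × Int)) : Int := (item.lookup "pos").getD 0

-- first loop of A: first idx with item["pos"] == pos
def pvAFind1 (l : List (List (String × Int))) (pos : Int) (idx : Int) : Option Int :=
  match l with
  | [] => none
  | item :: rest => if pvItemPos item = pos then some idx else pvAFind1 rest pos (idx + 1)

-- second loop of A: first idx with item["pos"] - 1 == pos
def pvAFind2 (l : List (List (String × Int))) (pos : Int) (idx : Int) : Option Int :=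
  match l with
  | [] => none
  | item :: rest => if pvItemPos item - 1 = pos then some idx else pvAFind2 rest pos (idx + 1)

def get_re_index_for_pos (regex_list : List (List (String × Int))) (pos : Int) : Int :=
  match pvAFind1 regex_list pos 0 with
  | some i => i
  | none =>
    match pvAFind2 regex_list pos 0 with
    | some i => i
    | none => -1

-- ===== PORT B =====
-- single pass: return idx on exact match, remember the first pos+1 candidate in `fallback`
def pvBGo (l : List (List (String × Int))) (pos : Int) (idx : Int) (fallback : Option Int) : Int :=
  match l with
  | [] => fallback.getD (-1)
  | item :: rest =>
    let p := pvItemPos item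
    if p = pos then idx
    else pvBGo rest pos (idx + 1) (if p = pos + 1 ∧ fallback = none then some idx else fallback)

def get_re_index_for_pos_alt (regex_list : List (List (String × Int))) (pos : Int) : Int :=
  pvBGo regex_list pos 0 none

-- ===== PRECONDITION & SPEC =====
-- Pre_ excludes exactly the inputs on which A raises KeyError: a "pos"-less item reached by
-- the first scan, i.e. one not preceded by an exact pos match.
def Pre_get_re_index_for_pos (regex_list : List (List (String × Int))) (pos : Int) : Prop :=
  ∀ i ∈ List.range regex_list.length,
    ((regex_list.getD i []).lookup "pos").isNone →
      ∃ j ∈ List.range i, (regex_list.getD j []).lookup "pos" = some pos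
instance (regex_list : List (List (String × Int))) (pos : Int) : Decidable (Pre_get_re_index_for_pos regex_list pos) := by unfold Pre_get_re_index_for_pos; infer_instance

def pvWitness_get_re_index_for_pos : (List (List (String × Int))) × Int :=
  ([[("pos", 2)], [("pos", 1)]], 1)

def Spec_get_re_index_for_pos (regex_list : List (List (String × Int))) (pos : Int) (out : Int) : Prop := out = get_re_index_for_pos_alt regex_list pos
instance (regex_list : List (List (String × Int))) (pos : Int) (out : Int) : Decidable (Spec_get_re_index_for_pos regex_list pos out) := by unfold Spec_get_re_index_for_pos; infer_instance

-- ===== CLAIM (what is proved, stated in full; the proofs are below) =====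
def Claim_equal_get_re_index_for_pos : Prop := ∀ (regex_list : List (List (String × Int))) (pos : Int), Dom_get_re_index_for_pos regex_list pos → Pre_get_re_index_for_pos regex_list pos → Spec_get_re_index_for_pos regex_list pos (get_re_index_for_pos regex_list pos)

-- ===== LEMMAS AND PROOFS =====

-- loop invariant: the one-pass scan equals "first exact match, else the recorded fallback,
-- else the first pos+1 match of the suffix, else -1"
theorem pvBGo_eq (l : List (List (String × Int))) (pos idx : Int) (fb : Option Int) :
    pvBGo l pos idx fb =
      match pvAFind1 l pos idx with
      | some i => i
      | none =>
        match fb with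
        | some f => f
        | none =>
          match pvAFind2 l pos idx with
          | some i => i
          | none => -1 := by
  induction l generalizing idx fb with
  | nil => cases fb <;> simp [pvBGo, pvAFind1, pvAFind2, Option.getD]
  | cons item rest ih =>
    simp only [pvBGo, pvAFind1, pvAFind2]
    by_cases h1 : pvItemPos item = pos
    · simp [h1]
    · simp only [h1, if_false]
      rw [ih]
      by_cases h2 : pvItemPos item = pos + 1
      · have h2' : pvItemPos item - 1 = pos := by omega
        cases fb with
        | none => simp [h2, h2']
        | some f => simp [h2]

      · have h2' : ¬ (pvItemPos item - 1 = pos) := by omega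
        cases fb with
        | none => simp [h2, h2']
        | some f => simp [h2]

-- ===== VERDICT (by name: the statement is the Claim_ definition above) =====
theorem get_re_index_for_pos_spec : Claim_equal_get_re_index_for_pos := by
  intro l pos _ _
  unfold Spec_get_re_index_for_pos get_re_index_for_pos get_re_index_for_pos_alt
  rw [pvBGo_eq]
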